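-- pv_equiv track=rewrite | github.com/fizbin/adventofcode | aoc15d.py | subtract_rect
-- ===== SOURCE A (Python) =====
-- def subtract_rect(rects, subtrahend):
--     retval = []
--     (umin, umax, vmin, vmax) = subtrahend
--     working = list(rects)
--     while working:
--         rect = working.pop()
--         (rumin, rumax, rvmin, rvmax) = rect
--         if (rumax < umin or umax < rumin or rvmax < vmin or vmax < rvmin):
--             # disjoint
--             retval.append(rect)
--         elif (umin <= rumin <= rumax <= umax and vmin <= rvmin <= rvmax <= vmax):
--             pass # consumed
--         elif (rumin < umin <= rumax):
--             working.append((rumin, umin-1, rvmin, rvmax))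
--             working.append((umin, rumax, rvmin, rvmax))
--         elif (rumin <= umax < rumax):
--             working.append((rumin, umax, rvmin, rvmax))
--             working.append((umax+1, rumax, rvmin, rvmax))
--         elif (rvmin < vmin <= rvmax):
--             working.append((rumin, rumax, rvmin, vmin-1))
--             working.append((rumin, rumax, vmin, rvmax))
--         elif (rvmin <= vmax < rvmax):
--             working.append((rumin, rumax, rvmin, vmax))
--             working.append((rumin, rumax, vmax+1, rvmax))
--     return retval
-- ===== SOURCE B (Python) =====
-- def subtract_rect(rects, subtrahend):
--     (umin, umax, vmin, vmax) = subtrahend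
--
--     def split(rect):
--         (rumin, rumax, rvmin, rvmax) = rect
--         if (rumax < umin or umax < rumin or rvmax < vmin or vmax < rvmin):
--             return [rect]  # disjoint
--         elif (umin <= rumin <= rumax <= umax and vmin <= rvmin <= rvmax <= vmax):
--             return []  # consumed
--         elif (rumin < umin <= rumax):
--             return split((umin, rumax, rvmin, rvmax)) + split((rumin, umin - 1, rvmin, rvmax))
--         elif (rumin <= umax < rumax):
--             return split((umax + 1, rumax, rvmin, rvmax)) + split((rumin, umax, rvmin, rvmax))
--         elif (rvmin < vmin <= rvmax):
--             return split((rumin, rumax, vmin, rvmax)) + split((rumin, rumax, rvmin, vmin - 1))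
--         elif (rvmin <= vmax < rvmax):
--             return split((rumin, rumax, vmax + 1, rvmax)) + split((rumin, rumax, rvmin, vmax))
--         else:
--             return []
--
--     out = []
--     for rect in reversed(rects):
--         out.extend(split(rect))
--     return out
-- ===== Notes on version B (the rewrite author's own statement) =====
-- stated objective: alternative
-- what changed: Replaces the explicit LIFO worklist stack with a recursive split(rect) helper that returns the surviving pieces of one rectangle, concatenating the results over the input rectangles in reverse order to reproduce the stack's output order.
import Mathlib
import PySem

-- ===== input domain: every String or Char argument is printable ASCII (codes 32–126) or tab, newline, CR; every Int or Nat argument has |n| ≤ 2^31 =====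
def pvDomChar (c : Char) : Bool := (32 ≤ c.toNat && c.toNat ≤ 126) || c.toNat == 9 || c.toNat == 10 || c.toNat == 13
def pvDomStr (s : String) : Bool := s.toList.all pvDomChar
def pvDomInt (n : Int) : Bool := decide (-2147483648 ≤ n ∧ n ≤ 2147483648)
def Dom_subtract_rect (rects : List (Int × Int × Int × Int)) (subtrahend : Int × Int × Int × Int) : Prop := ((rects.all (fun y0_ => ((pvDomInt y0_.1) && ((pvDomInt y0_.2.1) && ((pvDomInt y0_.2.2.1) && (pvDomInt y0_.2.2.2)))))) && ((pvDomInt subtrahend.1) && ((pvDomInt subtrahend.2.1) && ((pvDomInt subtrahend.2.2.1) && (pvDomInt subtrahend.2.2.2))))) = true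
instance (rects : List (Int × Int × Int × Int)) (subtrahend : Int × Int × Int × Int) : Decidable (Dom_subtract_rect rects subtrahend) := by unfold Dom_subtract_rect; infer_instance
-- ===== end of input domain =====

-- B replaces A's explicit LIFO worklist stack by a recursive split helper over each
-- rectangle, concatenated in reverse input order (objective: alternative decomposition).


-- measure of one rectangle (u-extent + v-extent), used only for termination
def pvRectM (r : Int × Int × Int × Int) : Nat :=
  (r.2.1 - r.1).toNat + (r.2.2.2 - r.2.2.1).toNat

-- weight of a stack entry; the stack measure is the sum of weights
def pvRectW (r : Int × Int × Int × Int) : Nat := 1 + 4 ^ pvRectM r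

theorem pvPow4_lt {a b c : Nat} (ha : a < c) (hb : b < c) :
    1 + 4 ^ a + 4 ^ b < 4 ^ c := by
  have h1 : 4 ^ a ≤ 4 ^ (c - 1) := Nat.pow_le_pow_right (by norm_num) (by omega)
  have h2 : 4 ^ b ≤ 4 ^ (c - 1) := Nat.pow_le_pow_right (by norm_num) (by omega)
  have h3 : 1 ≤ 4 ^ (c - 1) := Nat.one_le_pow _ _ (by norm_num)
  have h5 : c - 1 + 1 = c := by omega
  have h4 : 4 ^ c = 4 ^ (c - 1) * 4 :=
    calc 4 ^ c = 4 ^ (c - 1 + 1) := by rw [h5]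
    _ = 4 ^ (c - 1) * 4 := by rw [Nat.pow_succ]
  omega

-- ===== PORT A =====
-- A's while-loop over the mutable stack `working` (Python pops/pushes at the END of the
-- list; here the stack is kept top-first, so pop = head and pushing X then Y = Y :: X :: ·),
-- with `retval` the accumulator.  Initial stack = rects reversed (top = last element).
def subtract_rect_loop (umin umax vmin vmax : Int)
    (working retval : List (Int × Int × Int × Int)) : List (Int × Int × Int × Int) :=
  match working with
  | [] => retval
  | rect :: rest =>
    match rect with
    | (rumin, rumax, rvmin, rvmax) =>
    if h1 : rumax < umin ∨ umax < rumin ∨ rvmax < vmin ∨ vmax < rvmin then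
      subtract_rect_loop umin umax vmin vmax rest (retval ++ [rect])
    else if h2 : umin ≤ rumin ∧ rumin ≤ rumax ∧ rumax ≤ umax ∧ vmin ≤ rvmin ∧ rvmin ≤ rvmax ∧ rvmax ≤ vmax then
      subtract_rect_loop umin umax vmin vmax rest retval
    else if h3 : rumin < umin ∧ umin ≤ rumax then
      subtract_rect_loop umin umax vmin vmax
        ((umin, rumax, rvmin, rvmax) :: (rumin, umin - 1, rvmin, rvmax) :: rest) retval
    else if h4 : rumin ≤ umax ∧ umax < rumax then
      subtract_rect_loop umin umax vmin vmax
        ((umax + 1, rumax, rvmin, rvmax) :: (rumin, umax, rvmin, rvmax) :: rest) retval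
    else if h5 : rvmin < vmin ∧ vmin ≤ rvmax then
      subtract_rect_loop umin umax vmin vmax
        ((rumin, rumax, vmin, rvmax) :: (rumin, rumax, rvmin, vmin - 1) :: rest) retval
    else if h6 : rvmin ≤ vmax ∧ vmax < rvmax then
      subtract_rect_loop umin umax vmin vmax
        ((rumin, rumax, vmax + 1, rvmax) :: (rumin, rumax, rvmin, vmax) :: rest) retval
    else
      subtract_rect_loop umin umax vmin vmax rest retval
termination_by (working.map pvRectW).sum
decreasing_by
  · simp [pvRectW]
  · simp [pvRectW]
  · simp only [List.map_cons, List.sum_cons, pvRectW]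
    have := pvPow4_lt (a := pvRectM (umin, rumax, rvmin, rvmax))
      (b := pvRectM (rumin, umin - 1, rvmin, rvmax)) (c := pvRectM (rumin, rumax, rvmin, rvmax))
      (by simp [pvRectM]; omega) (by simp [pvRectM]; omega)
    omega
  · simp only [List.map_cons, List.sum_cons, pvRectW]
    have := pvPow4_lt (a := pvRectM (umax + 1, rumax, rvmin, rvmax))
      (b := pvRectM (rumin, umax, rvmin, rvmax)) (c := pvRectM (rumin, rumax, rvmin, rvmax))
      (by simp [pvRectM]; omega) (by simp [pvRectM]; omega)
    omega
  · simp only [List.map_cons, List.sum_cons, pvRectW]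
    have := pvPow4_lt (a := pvRectM (rumin, rumax, vmin, rvmax))
      (b := pvRectM (rumin, rumax, rvmin, vmin - 1)) (c := pvRectM (rumin, rumax, rvmin, rvmax))
      (by simp [pvRectM]; omega) (by simp [pvRectM]; omega)
    omega
  · simp only [List.map_cons, List.sum_cons, pvRectW]
    have := pvPow4_lt (a := pvRectM (rumin, rumax, vmax + 1, rvmax))
      (b := pvRectM (rumin, rumax, rvmin, vmax)) (c := pvRectM (rumin, rumax, rvmin, rvmax))
      (by simp [pvRectM]; omega) (by simp [pvRectM]; omega)
    omega
  · simp [pvRectW]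

def subtract_rect (rects : List (Int × Int × Int × Int)) (subtrahend : Int × Int × Int × Int) : List (Int × Int × Int × Int) :=
  match subtrahend with
  | (umin, umax, vmin, vmax) => subtract_rect_loop umin umax vmin vmax rects.reverse []

-- ===== PORT B =====
-- B's recursive helper split(rect): the surviving pieces of one rectangle
def subtract_rect_split (umin umax vmin vmax : Int)
    (rect : Int × Int × Int × Int) : List (Int × Int × Int × Int) :=
  match rect with
  | (rumin, rumax, rvmin, rvmax) =>
  if _h1 : rumax < umin ∨ umax < rumin ∨ rvmax < vmin ∨ vmax < rvmin then
    [rect]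
  else if _h2 : umin ≤ rumin ∧ rumin ≤ rumax ∧ rumax ≤ umax ∧ vmin ≤ rvmin ∧ rvmin ≤ rvmax ∧ rvmax ≤ vmax then
    []
  else if _h3 : rumin < umin ∧ umin ≤ rumax then
    subtract_rect_split umin umax vmin vmax (umin, rumax, rvmin, rvmax) ++
      subtract_rect_split umin umax vmin vmax (rumin, umin - 1, rvmin, rvmax)
  else if _h4 : rumin ≤ umax ∧ umax < rumax then
    subtract_rect_split umin umax vmin vmax (umax + 1, rumax, rvmin, rvmax) ++
      subtract_rect_split umin umax vmin vmax (rumin, umax, rvmin, rvmax)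
  else if _h5 : rvmin < vmin ∧ vmin ≤ rvmax then
    subtract_rect_split umin umax vmin vmax (rumin, rumax, vmin, rvmax) ++
      subtract_rect_split umin umax vmin vmax (rumin, rumax, rvmin, vmin - 1)
  else if _h6 : rvmin ≤ vmax ∧ vmax < rvmax then
    subtract_rect_split umin umax vmin vmax (rumin, rumax, vmax + 1, rvmax) ++
      subtract_rect_split umin umax vmin vmax (rumin, rumax, rvmin, vmax)
  else
    []
termination_by pvRectM rect
decreasing_by all_goals simp [pvRectM]; omega

-- B's main loop: `out.extend(split(rect))` for rect in reversed(rects)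
def subtract_rect_alt (rects : List (Int × Int × Int × Int)) (subtrahend : Int × Int × Int × Int) : List (Int × Int × Int × Int) :=
  match subtrahend with
  | (umin, umax, vmin, vmax) =>
    rects.reverse.foldl (fun out rect => out ++ subtract_rect_split umin umax vmin vmax rect) []

-- ===== PRECONDITION & SPEC =====
def Spec_subtract_rect (rects : List (Int × Int × Int × Int)) (subtrahend : Int × Int × Int × Int) (out : List (Int × Int × Int × Int)) : Prop := out = subtract_rect_alt rects subtrahend
instance (rects : List (Int × Int × Int × Int)) (subtrahend : Int × Int × Int × Int) (out : List (Int × Int × Int × Int)) : Decidable (Spec_subtract_rect rects subtrahend out) := by unfold Spec_subtract_rect; infer_instance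

-- ===== CLAIM (what is proved, stated in full; the proofs are below) =====
def Claim_equal_subtract_rect : Prop := ∀ (rects : List (Int × Int × Int × Int)) (subtrahend : Int × Int × Int × Int), Dom_subtract_rect rects subtrahend → Spec_subtract_rect rects subtrahend (subtract_rect rects subtrahend)

-- ===== LEMMAS AND PROOFS =====

-- the stack loop appends, in order, the surviving pieces of every stack entry
theorem subtract_rect_loop_eq (umin umax vmin vmax : Int)
    (working retval : List (Int × Int × Int × Int)) :
    subtract_rect_loop umin umax vmin vmax working retval
      = retval ++ working.flatMap (subtract_rect_split umin umax vmin vmax) := by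
  match working with
  | [] => simp [subtract_rect_loop]
  | (rumin, rumax, rvmin, rvmax) :: rest =>
    rw [subtract_rect_loop]
    simp only [List.flatMap_cons]
    rw [subtract_rect_split]
    split_ifs with h1 h2 h3 h4 h5 h6 <;>
      rw [subtract_rect_loop_eq] <;> simp
termination_by (working.map pvRectW).sum
decreasing_by
  · simp [pvRectW]
  · simp [pvRectW]
  · simp only [List.map_cons, List.sum_cons, pvRectW]
    have := pvPow4_lt (a := pvRectM (umin, rumax, rvmin, rvmax))
      (b := pvRectM (rumin, umin - 1, rvmin, rvmax)) (c := pvRectM (rumin, rumax, rvmin, rvmax))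
      (by simp [pvRectM]; omega) (by simp [pvRectM]; omega)
    omega
  · simp only [List.map_cons, List.sum_cons, pvRectW]
    have := pvPow4_lt (a := pvRectM (umax + 1, rumax, rvmin, rvmax))
      (b := pvRectM (rumin, umax, rvmin, rvmax)) (c := pvRectM (rumin, rumax, rvmin, rvmax))
      (by simp [pvRectM]; omega) (by simp [pvRectM]; omega)
    omega
  · simp only [List.map_cons, List.sum_cons, pvRectW]
    have := pvPow4_lt (a := pvRectM (rumin, rumax, vmin, rvmax))
      (b := pvRectM (rumin, rumax, rvmin, vmin - 1)) (c := pvRectM (rumin, rumax, rvmin, rvmax))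
      (by simp [pvRectM]; omega) (by simp [pvRectM]; omega)
    omega
  · simp only [List.map_cons, List.sum_cons, pvRectW]
    have := pvPow4_lt (a := pvRectM (rumin, rumax, vmax + 1, rvmax))
      (b := pvRectM (rumin, rumax, rvmin, vmax)) (c := pvRectM (rumin, rumax, rvmin, rvmax))
      (by simp [pvRectM]; omega) (by simp [pvRectM]; omega)
    omega
  · simp [pvRectW]

theorem foldl_append_split (f : (Int × Int × Int × Int) → List (Int × Int × Int × Int))
    (l acc : List (Int × Int × Int × Int)) :
    l.foldl (fun out rect => out ++ f rect) acc = acc ++ l.flatMap f := by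
  induction l generalizing acc with
  | nil => simp
  | cons x xs ih => simp [List.foldl, ih]

-- ===== VERDICT (by name: the statement is the Claim_ definition above) =====
theorem subtract_rect_spec : Claim_equal_subtract_rect := by
  intro rects ⟨umin, umax, vmin, vmax⟩ _
  show _ = _
  rw [subtract_rect, subtract_rect_alt]
  rw [subtract_rect_loop_eq, foldl_append_split]
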